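-- pv_equiv track=rewrite | github.com/rubensilva091/Python | LA2/Teino 1/apelidos.py | apelidos
-- ===== SOURCE A (Python) =====
-- def apelidos(nomes):
--     lista_nr_apelidos = sorted([((len(name.split())-1),name) for name in nomes])
--     aux1_list= []
--     final_list=[]
--     for (size1,name1) in lista_nr_apelidos:
--         aux2_list=[]
--         for (size2,name2) in lista_nr_apelidos:
--             if (size1==size2):
--                 aux2_list.append(name2)
--         if (aux2_list not in aux1_list):
--             aux1_list.append(aux2_list)
--     for lista in aux1_list:
--         sorted(lista)
--         for membro in lista:
--             final_list.append(membro)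
--     return final_list
-- ===== SOURCE B (Python) =====
-- def apelidos(nomes):
--     return [name for _, name in sorted((len(name.split()) - 1, name) for name in nomes)]
-- ===== Notes on version B (the rewrite author's own statement) =====
-- stated objective: faster
-- what changed: B sorts the (surname_count, name) pairs once and extracts the names directly, removing A's quadratic inner scan that rebuilds each size-group per element and the group-list dedup pass.
import Mathlib
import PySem

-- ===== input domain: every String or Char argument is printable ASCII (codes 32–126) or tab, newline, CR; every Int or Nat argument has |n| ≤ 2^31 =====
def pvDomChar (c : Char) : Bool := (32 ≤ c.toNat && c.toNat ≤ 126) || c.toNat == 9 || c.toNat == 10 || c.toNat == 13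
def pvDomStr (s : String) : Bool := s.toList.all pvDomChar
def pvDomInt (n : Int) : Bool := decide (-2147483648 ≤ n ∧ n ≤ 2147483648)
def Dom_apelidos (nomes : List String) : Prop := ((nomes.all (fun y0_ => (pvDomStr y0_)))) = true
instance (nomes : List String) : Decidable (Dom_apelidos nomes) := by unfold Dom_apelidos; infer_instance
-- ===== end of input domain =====

-- B replaces A's quadratic per-element group rebuilding by a single sort of (surname_count, name)
-- pairs followed by extracting the names; measured asymptotically faster (O(n log n) vs O(n^2)).


-- ===== PORT A =====
-- Literal port of A: sort the (len(name.split())-1, name) pairs, then for each pair rebuild the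
-- list of all names with the same count (inner scan), dedup those group lists, and flatten.
-- (The bare `sorted(lista)` in A's last loop discards its result — a no-op, not ported.)
def apelidos (nomes : List String) : List String :=
  let lista_nr_apelidos :=
    PySem.List.sorted2 (nomes.map (fun name => (((PySem.Str.split₀ name).length : Int) - 1, name)))
      Prod.fst Prod.snd
  let aux1_list := lista_nr_apelidos.foldl (fun aux1_list p =>
      let aux2_list := lista_nr_apelidos.foldl (fun aux2_list q =>
          if p.1 == q.1 then aux2_list ++ [q.2] else aux2_list) []
      if aux2_list ∈ aux1_list then aux1_list else aux1_list ++ [aux2_list]) []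
  aux1_list.foldl (fun final_list lista =>
      lista.foldl (fun final_list membro => final_list ++ [membro]) final_list) []

-- ===== PORT B =====
-- B: sort the (surname_count, name) pairs once, return the names in that order.
def apelidos_alt (nomes : List String) : List String :=
  (PySem.List.sorted2 (nomes.map (fun name => (((PySem.Str.split₀ name).length : Int) - 1, name)))
      Prod.fst Prod.snd).map Prod.snd

-- ===== PRECONDITION & SPEC =====
def Spec_apelidos (nomes : List String) (out : List String) : Prop := out = apelidos_alt nomes
instance (nomes : List String) (out : List String) : Decidable (Spec_apelidos nomes out) := by unfold Spec_apelidos; infer_instance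

-- ===== CLAIM (what is proved, stated in full; the proofs are below) =====
def Claim_equal_apelidos : Prop := ∀ (nomes : List String), Dom_apelidos nomes → Spec_apelidos nomes (apelidos nomes)

-- ===== LEMMAS AND PROOFS =====

-- Surname count of a name, and the sorted pair list both ports share.
def pvKey (n : String) : Int := ((PySem.Str.split₀ n).length : Int) - 1

def pvL (nomes : List String) : List (Int × String) :=
  PySem.List.sorted2 (nomes.map (fun name => (((PySem.Str.split₀ name).length : Int) - 1, name)))
    Prod.fst Prod.snd

-- The comparison sorted2 uses on our pairs, and the (lexicographic ≤) order it produces.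
def pvBef (a b : Int × String) : Bool :=
  decide (a.1 < b.1) || (!decide (b.1 < a.1) && decide (a.2 < b.2))

def pvLexLE (a b : Int × String) : Prop := a.1 < b.1 ∨ (a.1 = b.1 ∧ a.2 ≤ b.2)

-- A's inner scan (the group of all names whose count equals s) and A's dedup step.
def pvGrp (L : List (Int × String)) (s : Int) : List String :=
  L.foldl (fun acc q => if s == q.1 then acc ++ [q.2] else acc) []

def pvStep (G : Int → List String) (acc : List (List String)) (p : Int × String) : List (List String) :=
  let g := G p.1
  if g ∈ acc then acc else acc ++ [g]

lemma pvFlattenFold (gs : List (List String)) (init : List String) :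
    gs.foldl (fun final_list lista =>
      lista.foldl (fun final_list membro => final_list ++ [membro]) final_list) init
      = init ++ gs.flatten := by
  induction gs generalizing init with
  | nil => simp
  | cons g gs ih =>
    rw [List.foldl_cons, PySem.List.foldl_append_singleton, ih, List.flatten_cons,
      List.append_assoc]

lemma pvApelidosEq (nomes : List String) :
    apelidos nomes = ((pvL nomes).foldl (pvStep (pvGrp (pvL nomes))) []).flatten := by
  unfold apelidos
  rw [pvFlattenFold]
  rfl

lemma pvGrpFilter (L : List (Int × String)) (s : Int) :
    pvGrp L s = (L.filter (fun q => s == q.1)).map Prod.snd := by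
  unfold pvGrp
  rw [PySem.List.foldl_append_if (fun q => s == q.1) Prod.snd L []]
  simp

lemma pvBefTrue {a b : Int × String} (h : pvBef a b = true) : pvLexLE a b := by
  unfold pvBef at h; unfold pvLexLE
  simp only [Bool.or_eq_true, Bool.and_eq_true, Bool.not_eq_true', decide_eq_true_eq,
    decide_eq_false_iff_not] at h
  rcases h with h | ⟨h1, h2⟩
  · exact Or.inl h
  · rcases lt_or_ge a.1 b.1 with hlt | hge
    · exact Or.inl hlt
    · have h1' : a.1 ≤ b.1 := not_lt.mp h1
      exact Or.inr ⟨by omega, le_of_lt h2⟩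

lemma pvBefFalse {a b : Int × String} (h : pvBef a b = false) : pvLexLE b a := by
  unfold pvBef at h; unfold pvLexLE
  simp only [Bool.or_eq_false_iff, Bool.and_eq_false_iff, Bool.not_eq_false',
    decide_eq_true_eq, decide_eq_false_iff_not] at h
  obtain ⟨h1, h2⟩ := h
  have h1' : b.1 ≤ a.1 := not_lt.mp h1
  rcases h2 with h2 | h2
  · exact Or.inl h2
  · rcases lt_or_ge b.1 a.1 with hlt | hge
    · exact Or.inl hlt
    · exact Or.inr ⟨by omega, le_of_not_gt h2⟩

lemma pvLexLETrans {a b c : Int × String} (h1 : pvLexLE a b) (h2 : pvLexLE b c) : pvLexLE a c := by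
  unfold pvLexLE at *
  rcases h1 with h1 | ⟨h1, h1'⟩ <;> rcases h2 with h2 | ⟨h2, h2'⟩
  · exact Or.inl (lt_trans h1 h2)
  · exact Or.inl (by omega)
  · exact Or.inl (by omega)
  · exact Or.inr ⟨by omega, le_trans h1' h2'⟩

lemma pvInsertByPW (x : Int × String) (l : List (Int × String)) (hl : l.Pairwise pvLexLE) :
    (PySem.List.insertBy pvBef x l).Pairwise pvLexLE := by
  induction l with
  | nil => simp [PySem.List.insertBy]
  | cons y ys ih =>
    rw [List.pairwise_cons] at hl
    obtain ⟨hy, hys⟩ := hl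
    by_cases hb : pvBef x y = true
    · rw [show PySem.List.insertBy pvBef x (y :: ys) = x :: y :: ys by
        simp [PySem.List.insertBy, hb]]
      refine List.pairwise_cons.mpr ⟨?_, List.pairwise_cons.mpr ⟨hy, hys⟩⟩
      intro z hz
      rcases List.mem_cons.mp hz with rfl | hz
      · exact pvBefTrue hb
      · exact pvLexLETrans (pvBefTrue hb) (hy z hz)
    · rw [show PySem.List.insertBy pvBef x (y :: ys) = y :: PySem.List.insertBy pvBef x ys by
        simp [PySem.List.insertBy, hb]]
      refine List.pairwise_cons.mpr ⟨?_, ih hys⟩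
      intro z hz
      rcases (PySem.List.mem_insertBy pvBef x z ys).mp hz with rfl | hz
      · exact pvBefFalse (by simpa using hb)
      · exact hy z hz

lemma pvFoldInsertPW (xs : List (Int × String)) (acc : List (Int × String))
    (h : acc.Pairwise pvLexLE) :
    (xs.foldl (fun a x => PySem.List.insertBy pvBef x a) acc).Pairwise pvLexLE := by
  induction xs generalizing acc with
  | nil => exact h
  | cons x xs ih => exact ih _ (pvInsertByPW x acc h)

lemma pvSortedPW (nomes : List String) : (pvL nomes).Pairwise pvLexLE := by
  have hrfl : pvL nomes
      = (nomes.map (fun name => (((PySem.Str.split₀ name).length : Int) - 1, name))).foldl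
          (fun a x => PySem.List.insertBy pvBef x a) [] := rfl
  rw [hrfl]
  exact pvFoldInsertPW _ [] List.Pairwise.nil

lemma pvSortedKey (nomes : List String) : ∀ p ∈ pvL nomes, p.1 = pvKey p.2 := by
  intro p hp
  have hmem : p ∈ nomes.map (fun name => (((PySem.Str.split₀ name).length : Int) - 1, name)) :=
    (PySem.List.sorted2_perm _ _ _ _).mem_iff.mp hp
  obtain ⟨name, _, rfl⟩ := List.mem_map.mp hmem
  rfl

-- once the group list is already in the accumulator, further elements of the run change nothing
lemma pvFoldConst (G : Int → List String) (g0 : List String) :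
    ∀ (R : List (Int × String)) (acc : List (List String)),
      (∀ q ∈ R, G q.1 = g0) → g0 ∈ acc → R.foldl (pvStep G) acc = acc := by
  intro R
  induction R with
  | nil => intro acc _ _; rfl
  | cons r R ih =>
    intro acc hall hmem
    have hr : G r.1 = g0 := hall r List.mem_cons_self
    have : pvStep G acc r = acc := by unfold pvStep; simp [hr, hmem]
    rw [List.foldl_cons, this]
    exact ih acc (fun q hq => hall q (List.mem_cons_of_mem _ hq)) hmem

-- a head group no later element can produce can be pulled out of the dedup fold
lemma pvFoldConsOut (G : Int → List String) (g0 : List String) :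
    ∀ (T : List (Int × String)) (acc : List (List String)),
      (∀ q ∈ T, G q.1 ≠ g0) →
      T.foldl (pvStep G) (g0 :: acc) = g0 :: T.foldl (pvStep G) acc := by
  intro T
  induction T with
  | nil => intro acc _; rfl
  | cons t T ih =>
    intro acc hne
    have ht : G t.1 ≠ g0 := hne t List.mem_cons_self
    have hstep : pvStep G (g0 :: acc) t = g0 :: pvStep G acc t := by
      unfold pvStep
      by_cases hm : G t.1 ∈ acc
      · simp [hm, ht]
      · simp [hm, ht]
    rw [List.foldl_cons, hstep, List.foldl_cons]
    exact ih _ (fun q hq => hne q (List.mem_cons_of_mem _ hq))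

-- Main lemma: on a lexicographically sorted, key-consistent pair list, A's dedup-groups-and-
-- flatten computation returns exactly the second components in order.
lemma pvMain : ∀ (n : Nat) (L : List (Int × String)), L.length ≤ n →
    L.Pairwise pvLexLE → (∀ p ∈ L, p.1 = pvKey p.2) →
    (L.foldl (pvStep (pvGrp L)) []).flatten = L.map Prod.snd := by
  intro n
  induction n with
  | zero =>
    intro L hlen _ _
    rw [List.length_eq_zero_iff.mp (Nat.le_zero.mp hlen)]
    rfl
  | succ n ih =>
    intro L hlen hpw hk
    match hL : L with
    | [] => rfl
    | p :: rest =>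
      set pr : Int × String → Bool := fun q => q.1 == p.1 with hpr
      set R := (p :: rest).takeWhile pr with hRdef
      set T := (p :: rest).dropWhile pr with hTdef
      have hRT : R ++ T = p :: rest := List.takeWhile_append_dropWhile
      have hR1 : ∀ q ∈ R, q.1 = p.1 := by
        intro q hq
        have := List.mem_takeWhile_imp hq
        simpa [hpr] using this
      have hRcons : ∃ R', R = p :: R' := by
        refine ⟨rest.takeWhile pr, ?_⟩
        rw [hRdef, List.takeWhile_cons_of_pos (by simp [hpr])]
      have hpwRT : (R ++ T).Pairwise pvLexLE := by rw [hRT]; exact hpw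
      obtain ⟨hpwR, hpwT, hcross⟩ := List.pairwise_append.mp hpwRT
      have hT : ∀ q ∈ T, p.1 < q.1 := by
        intro q hq
        match hTc : T with
        | [] => simp at hq
        | h :: T' =>
          have hhead : pr h = false := by
            have := List.head_dropWhile_not pr (l := p :: rest) (by rw [← hTdef]; simp)
            simpa [← hTdef] using this
          have hne : h.1 ≠ p.1 := by simpa [hpr] using hhead
          obtain ⟨R', hR'⟩ := hRcons
          have hpmem : p ∈ R := by rw [hR']; exact List.mem_cons_self
          have hph : pvLexLE p h := hcross p hpmem h List.mem_cons_self
          have hph' : p.1 < h.1 := by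
            rcases hph with h1 | ⟨h1, _⟩
            · exact h1
            · exact absurd h1.symm hne
          rcases List.mem_cons.mp hq with rfl | hq'
          · exact hph'
          · have := (List.pairwise_cons.mp hpwT).1 q hq'
            rcases this with h2 | ⟨h2, _⟩
            · omega
            · omega
      have hkR : ∀ q ∈ R, q.1 = pvKey q.2 := fun q hq =>
        hk q (by rw [← hRT]; exact List.mem_append_left _ hq)
      have hkT : ∀ q ∈ T, q.1 = pvKey q.2 := fun q hq =>
        hk q (by rw [← hRT]; exact List.mem_append_right _ hq)
      set g0 : List String := R.map Prod.snd with hg0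
      have hgrp0 : pvGrp (p :: rest) p.1 = g0 := by
        rw [pvGrpFilter, ← hRT, List.filter_append]
        have h1 : R.filter (fun q => p.1 == q.1) = R :=
          List.filter_eq_self.mpr (fun q hq => by simp [hR1 q hq])
        have h2 : T.filter (fun q => p.1 == q.1) = [] :=
          List.filter_eq_nil_iff.mpr (fun q hq => by
            have := hT q hq; simp; omega)
        rw [h1, h2, List.append_nil]
      have hgrpT : ∀ q ∈ T, pvGrp (p :: rest) q.1 = pvGrp T q.1 := by
        intro q hq
        rw [pvGrpFilter, pvGrpFilter, ← hRT, List.filter_append]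
        have h1 : R.filter (fun x => q.1 == x.1) = [] :=
          List.filter_eq_nil_iff.mpr (fun r hr => by
            have hq1 := hT q hq
            have hr1 := hR1 r hr
            simp; omega)
        rw [h1, List.nil_append]
      have hTne : ∀ q ∈ T, pvGrp T q.1 ≠ g0 := by
        intro q hq heq
        have hqin : q.2 ∈ pvGrp T q.1 := by
          rw [pvGrpFilter]
          exact List.mem_map.mpr ⟨q, List.mem_filter.mpr ⟨hq, by simp⟩, rfl⟩
        rw [heq, hg0] at hqin
        obtain ⟨r, hr, hr2⟩ := List.mem_map.mp hqin
        have : q.1 = r.1 := by rw [hkT q hq, hkR r hr, hr2]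
        have := hT q hq
        have := hR1 r hr
        omega
      -- run the fold over R, then over T
      obtain ⟨R', hR'⟩ := hRcons
      have hfoldR : R.foldl (pvStep (pvGrp (p :: rest))) [] = [g0] := by
        rw [hR', List.foldl_cons]
        have hstep1 : pvStep (pvGrp (p :: rest)) [] p = [g0] := by
          unfold pvStep; simp [hgrp0]
        rw [hstep1]
        exact pvFoldConst _ g0 R' [g0]
          (fun q hq => by
            rw [show q.1 = p.1 from hR1 q (by rw [hR']; exact List.mem_cons_of_mem _ hq)]
            exact hgrp0)
          List.mem_cons_self
      have hcongr : T.foldl (pvStep (pvGrp (p :: rest))) [g0]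
          = T.foldl (pvStep (pvGrp T)) [g0] :=
        PySem.List.foldl_congr_mem T _ _ [g0] (fun acc q hq => by
          unfold pvStep; rw [hgrpT q hq])
      have hout : T.foldl (pvStep (pvGrp T)) [g0] = g0 :: T.foldl (pvStep (pvGrp T)) [] :=
        pvFoldConsOut _ g0 T [] hTne
      have hlenT : T.length ≤ n := by
        have h1 : R.length + T.length = (p :: rest).length := by
          rw [← List.length_append, hRT]
        have h2 : 0 < R.length := by rw [hR']; simp
        simp only [List.length_cons] at h1 hlen
        omega
      have hih := ih T hlenT hpwT hkT
      calc ((p :: rest).foldl (pvStep (pvGrp (p :: rest))) []).flatten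
          = ((R ++ T).foldl (pvStep (pvGrp (p :: rest))) []).flatten := by rw [hRT]
        _ = (T.foldl (pvStep (pvGrp (p :: rest))) (R.foldl (pvStep (pvGrp (p :: rest))) [])).flatten := by
              rw [List.foldl_append]
        _ = (g0 :: T.foldl (pvStep (pvGrp T)) []).flatten := by rw [hfoldR, hcongr, hout]
        _ = g0 ++ (T.foldl (pvStep (pvGrp T)) []).flatten := by rw [List.flatten_cons]
        _ = R.map Prod.snd ++ T.map Prod.snd := by rw [hih, hg0]
        _ = (p :: rest).map Prod.snd := by rw [← List.map_append, hRT]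

-- ===== VERDICT (by name: the statement is the Claim_ definition above) =====
theorem apelidos_spec : Claim_equal_apelidos := by
  intro nomes _
  unfold Spec_apelidos
  rw [pvApelidosEq]
  rw [pvMain (pvL nomes).length (pvL nomes) le_rfl (pvSortedPW nomes) (pvSortedKey nomes)]
  rfl
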